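-- pv_equiv track=rewrite | github.com/Lukzboz/adventofcode | 2016/day11b.py | check4ChipKills
-- ===== SOURCE A (Python) =====
-- import math
--
-- def check4ChipKills(floor):
-- 	length = floor.bit_length()
-- 	#is there a generator?
-- 	num = 0
-- 	for x in range (0, length, 2):
-- 		num += 2**x
-- 	if (floor & num == 0):
-- 		#no generators -> allways save
-- 		return True
-- 	for x in range (0, length, 2):
-- 		check = floor % 4
-- 		floor = int(math.floor((floor / 4)))
-- 		if (check == 2):
-- 			#found an unprotected chip -> BURN IN HELL!
-- 			return False
-- 	#every chip is save YaY!
-- 	return True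
-- ===== SOURCE B (Python) =====
-- def check4ChipKills(floor):
--     k = (floor.bit_length() + 1) // 2
--     m = (4 ** k - 1) // 3
--     gens = floor & m
--     if gens == 0:
--         return True
--     chips = (floor >> 1) & m
--     return chips & ~gens == 0
-- ===== Notes on version B (the rewrite author's own statement) =====
-- stated objective: alternative
-- what changed: Replaces A's two explicit loops over bit-pair groups (one summing 2**x to build the generator mask, one repeatedly dividing floor by 4 to scan for an unprotected chip) by whole-word mask arithmetic: a closed-form even-position mask m = (4**k-1)//3, gens = floor & m, chips = (floor >> 1) & m, answer (chips & ~gens) == 0.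
import Mathlib
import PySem

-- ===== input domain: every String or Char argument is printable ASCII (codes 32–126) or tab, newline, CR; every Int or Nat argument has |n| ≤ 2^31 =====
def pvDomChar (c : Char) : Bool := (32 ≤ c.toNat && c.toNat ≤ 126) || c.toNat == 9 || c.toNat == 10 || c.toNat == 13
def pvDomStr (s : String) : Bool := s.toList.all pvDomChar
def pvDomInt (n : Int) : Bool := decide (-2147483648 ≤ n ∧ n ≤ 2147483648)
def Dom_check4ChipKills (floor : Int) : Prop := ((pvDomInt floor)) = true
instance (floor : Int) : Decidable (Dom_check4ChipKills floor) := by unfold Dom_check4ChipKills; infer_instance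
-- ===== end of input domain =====

-- B replaces A's two explicit group-scanning loops by whole-word mask arithmetic on an
-- even-position bitmask (alternative algorithm; no speed claim is made).

-- ===== PORT A =====
-- A's second loop: one iteration per element of range(0, length, 2), returning False early on an
-- unprotected chip (floor % 4 == 2); the loop variable is unused, floor is re-divided by 4 each turn.
-- 'int(math.floor(floor / 4))' is ported as floor-division by 4: exact on the stated domain
-- (|floor| ≤ 2^31, where floor / 4 is an exact IEEE double).
def check4ChipKillsLoop : List Int → Int → Bool
  | [], _ => true
  | _ :: xs, f =>
    let check := PySem.Int.mod f 4
    let f' := PySem.Int.floordiv f 4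
    if check = 2 then false else check4ChipKillsLoop xs f'

def check4ChipKills (floor : Int) : Bool :=
  let length : Int := (PySem.Int.bitLength floor : Int)
  let num : Int := (PySem.List.pyRange 0 length 2).foldl (fun acc x => acc + 2 ^ x.toNat) 0
  if PySem.Int.band floor num = 0 then
    true
  else
    check4ChipKillsLoop (PySem.List.pyRange 0 length 2) floor

-- ===== PORT B =====
def check4ChipKills_alt (floor : Int) : Bool :=
  let k : Int := PySem.Int.floordiv ((PySem.Int.bitLength floor : Int) + 1) 2
  let m : Int := PySem.Int.floordiv (4 ^ k.toNat - 1) 3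
  let gens : Int := PySem.Int.band floor m
  if gens = 0 then
    true
  else
    let chips : Int := PySem.Int.band (floor >>> (1 : Nat)) m
    decide (PySem.Int.band chips (Int.not gens) = 0)

-- ===== PRECONDITION & SPEC =====
def Spec_check4ChipKills (floor : Int) (out : Bool) : Prop := out = check4ChipKills_alt floor
instance (floor : Int) (out : Bool) : Decidable (Spec_check4ChipKills floor out) := by unfold Spec_check4ChipKills; infer_instance

-- ===== CLAIM (what is proved, stated in full; the proofs are below) =====
def Claim_equal_check4ChipKills : Prop := ∀ (floor : Int), Dom_check4ChipKills floor → Spec_check4ChipKills floor (check4ChipKills floor)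

-- ===== LEMMAS AND PROOFS =====

-- the even-position mask with K groups: pvMu K = 0b0101…01 (K one-bits)
def pvMu : Nat → Int
  | 0 => 0
  | K + 1 => 4 * pvMu K + 1

theorem pvMu_nonneg (K : Nat) : 0 ≤ pvMu K := by
  induction K with
  | zero => simp [pvMu]
  | succ K ih => simp only [pvMu]; omega

theorem pvMu_three_mul (K : Nat) : 3 * pvMu K = 4 ^ K - 1 := by
  induction K with
  | zero => simp [pvMu]
  | succ K ih => simp only [pvMu, pow_succ]; omega

theorem pvNatB2 (A B R S : ℕ) (hR : R < 2) (hS : S < 2) :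
    (2*A+R) &&& (2*B+S) = 2*(A &&& B) + R*S := by
  have hrs : R*S < 2 := by interval_cases R <;> interval_cases S <;> decide
  have hle := Nat.and_le_left (n := A) (m := B)
  apply Nat.eq_of_testBit_eq; intro i
  cases i with
  | zero =>
      rw [Nat.testBit_land, Nat.testBit_zero, Nat.testBit_zero, Nat.testBit_zero]
      interval_cases R <;> interval_cases S <;> simp [Nat.mul_mod_right]
  | succ i =>
      rw [Nat.testBit_land, Nat.testBit_succ, Nat.testBit_succ, Nat.testBit_succ,
          (by omega : (2*A+R)/2 = A), (by omega : (2*B+S)/2 = B),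
          (by omega : (2*(A &&& B)+R*S)/2 = A &&& B),
          Nat.testBit_land]

theorem pvNatB2or (A B R S : ℕ) (hR : R < 2) (hS : S < 2) :
    (2*A+R) ||| (2*B+S) = 2*(A ||| B) + (R ||| S) := by
  have hrs : R ||| S < 2 := by interval_cases R <;> interval_cases S <;> decide
  apply Nat.eq_of_testBit_eq; intro i
  cases i with
  | zero =>
      rw [Nat.testBit_lor, Nat.testBit_zero, Nat.testBit_zero, Nat.testBit_zero]
      interval_cases R <;> interval_cases S <;> simp [Nat.mul_mod_right]
  | succ i =>
      rw [Nat.testBit_lor, Nat.testBit_succ, Nat.testBit_succ, Nat.testBit_succ,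
          (by omega : (2*A+R)/2 = A), (by omega : (2*B+S)/2 = B),
          (by omega : (2*(A ||| B)+(R ||| S))/2 = A ||| B),
          Nat.testBit_lor]

theorem pvBandB2 (a b r s : Int) (hr : r = 0 ∨ r = 1) (hs : s = 0 ∨ s = 1) :
    PySem.Int.band (2*a+r) (2*b+s) = 2 * PySem.Int.band a b + r*s := by
  have hr0 : 0 ≤ r := by rcases hr with rfl|rfl <;> norm_num
  have hr2 : r < 2 := by rcases hr with rfl|rfl <;> norm_num
  have hs0 : 0 ≤ s := by rcases hs with rfl|rfl <;> norm_num
  have hs2 : s < 2 := by rcases hs with rfl|rfl <;> norm_num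
  by_cases ha : 0 ≤ a <;> by_cases hb : 0 ≤ b
  · simp only [PySem.Int.band, if_pos (show (0:Int) ≤ 2*a+r by omega),
      if_pos (show (0:Int) ≤ 2*b+s by omega), if_pos ha, if_pos hb]
    rw [(by omega : (2*a+r).toNat = 2*a.toNat + r.toNat),
        (by omega : (2*b+s).toNat = 2*b.toNat + s.toNat),
        pvNatB2 _ _ _ _ (by omega) (by omega)]
    rcases hr with rfl|rfl <;> rcases hs with rfl|rfl <;> simp only [Int.toNat_zero, Int.toNat_one, show ((1:Int)-1).toNat = 0 from by norm_num, show ((1:Int)-0).toNat = 1 from by norm_num, show ((1:ℕ)|||1) = 1 from rfl, show ((1:ℕ)|||0) = 1 from rfl, show ((0:ℕ)|||1) = 1 from rfl, show ((0:ℕ)|||0) = 0 from rfl] <;> omega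
  · have := Nat.and_le_left (n := a.toNat) (m := (-b-1).toNat)
    have h2 := Nat.and_le_left (n := 2*a.toNat + r.toNat) (m := 2*(-b-1).toNat + (1-s).toNat)
    simp only [PySem.Int.band, if_pos (show (0:Int) ≤ 2*a+r by omega),
      if_neg (show ¬ (0:Int) ≤ 2*b+s by omega), if_pos ha, if_neg hb]
    rw [(by omega : (2*a+r).toNat = 2*a.toNat + r.toNat),
        (by omega : (-(2*b+s)-1).toNat = 2*(-b-1).toNat + (1-s).toNat),
        pvNatB2 _ _ _ _ (by omega) (by omega)]
    rcases hr with rfl|rfl <;> rcases hs with rfl|rfl <;> simp only [Int.toNat_zero, Int.toNat_one, show ((1:Int)-1).toNat = 0 from by norm_num, show ((1:Int)-0).toNat = 1 from by norm_num, show ((1:ℕ)|||1) = 1 from rfl, show ((1:ℕ)|||0) = 1 from rfl, show ((0:ℕ)|||1) = 1 from rfl, show ((0:ℕ)|||0) = 0 from rfl] <;> omega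
  · have := Nat.and_le_left (n := b.toNat) (m := (-a-1).toNat)
    simp only [PySem.Int.band, if_neg (show ¬ (0:Int) ≤ 2*a+r by omega),
      if_pos (show (0:Int) ≤ 2*b+s by omega), if_neg ha, if_pos hb]
    rw [(by omega : (2*b+s).toNat = 2*b.toNat + s.toNat),
        (by omega : (-(2*a+r)-1).toNat = 2*(-a-1).toNat + (1-r).toNat),
        pvNatB2 _ _ _ _ (by omega) (by omega)]
    rcases hr with rfl|rfl <;> rcases hs with rfl|rfl <;> simp only [Int.toNat_zero, Int.toNat_one, show ((1:Int)-1).toNat = 0 from by norm_num, show ((1:Int)-0).toNat = 1 from by norm_num, show ((1:ℕ)|||1) = 1 from rfl, show ((1:ℕ)|||0) = 1 from rfl, show ((0:ℕ)|||1) = 1 from rfl, show ((0:ℕ)|||0) = 0 from rfl] <;> omega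
  · simp only [PySem.Int.band, if_neg (show ¬ (0:Int) ≤ 2*a+r by omega),
      if_neg (show ¬ (0:Int) ≤ 2*b+s by omega), if_neg ha, if_neg hb]
    rw [(by omega : (-(2*a+r)-1).toNat = 2*(-a-1).toNat + (1-r).toNat),
        (by omega : (-(2*b+s)-1).toNat = 2*(-b-1).toNat + (1-s).toNat),
        pvNatB2or _ _ _ _ (by omega) (by omega)]
    rcases hr with rfl|rfl <;> rcases hs with rfl|rfl <;> simp only [Int.toNat_zero, Int.toNat_one, show ((1:Int)-1).toNat = 0 from by norm_num, show ((1:Int)-0).toNat = 1 from by norm_num, show ((1:ℕ)|||1) = 1 from rfl, show ((1:ℕ)|||0) = 1 from rfl, show ((0:ℕ)|||1) = 1 from rfl, show ((0:ℕ)|||0) = 0 from rfl] <;> omega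

theorem pvNotI (a : Int) : Int.not a = -a - 1 := by
  cases a <;> simp [Int.not, Int.negSucc_eq] <;> ring

theorem pvBandNonneg (a b : Int) (h : 0 ≤ b) : 0 ≤ PySem.Int.band a b := by
  rw [PySem.Int.band_comm]; exact PySem.Int.band_nonneg_of_nonneg_left a h

theorem pvMain (K : Nat) (f : Int) :
    check4ChipKillsLoop (List.replicate K (0:Int)) f =
      decide (PySem.Int.band (PySem.Int.band (f >>> (1:Nat)) (pvMu K))
        (Int.not (PySem.Int.band f (pvMu K))) = 0) := by
  induction K generalizing f with
  | zero =>
      simp [pvMu, check4ChipKillsLoop, List.replicate, PySem.Int.band_zero,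
        show Int.not 0 = -1 from rfl, PySem.Int.band_neg_one]
  | succ K ih =>
      set f1 : Int := f / 2 with hf1
      set b0 : Int := f % 2 with hb0
      set q2 : Int := f / 4 with hq2
      set b1 : Int := f1 % 2 with hb1
      set q3 : Int := q2 / 2 with hq3
      set b2 : Int := q2 % 2 with hb2
      have hb0' : b0 = 0 ∨ b0 = 1 := by omega
      have hb1' : b1 = 0 ∨ b1 = 1 := by omega
      have hb2' : b2 = 0 ∨ b2 = 1 := by omega
      set M : Int := pvMu K with hM
      have hM0 : 0 ≤ M := pvMu_nonneg K
      set G : Int := PySem.Int.band q2 M with hG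
      set C : Int := PySem.Int.band q3 M with hC
      have hMu : pvMu (K+1) = 2*(2*M) + 1 := by simp only [pvMu, ← hM]; ring
      have hshr : f >>> (1:Nat) = f1 := by rw [Int.shiftRight_eq_div_pow]; omega
      have hshrq : q2 >>> (1:Nat) = q3 := by rw [Int.shiftRight_eq_div_pow]; omega
      have hgens : PySem.Int.band f (pvMu (K+1)) = 4*G + b0 := by
        have e1 : PySem.Int.band f1 (2*M) = 2*G := by
          calc PySem.Int.band f1 (2*M) = PySem.Int.band (2*q2 + b1) (2*M + 0) := by
                congr 1 <;> omega
            _ = 2 * PySem.Int.band q2 M + b1 * 0 := pvBandB2 _ _ _ _ hb1' (Or.inl rfl)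
            _ = 2*G := by rw [hG]; ring
        calc PySem.Int.band f (pvMu (K+1))
            = PySem.Int.band (2*f1 + b0) (2*(2*M) + 1) := by rw [hMu]; congr 1; omega
          _ = 2 * PySem.Int.band f1 (2*M) + b0 * 1 := pvBandB2 _ _ _ _ hb0' (Or.inr rfl)
          _ = 4*G + b0 := by rw [e1]; ring
      have hchips : PySem.Int.band (f >>> (1:Nat)) (pvMu (K+1)) = 4*C + b1 := by
        have e1 : PySem.Int.band q2 (2*M) = 2*C := by
          calc PySem.Int.band q2 (2*M) = PySem.Int.band (2*q3 + b2) (2*M + 0) := by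
                congr 1 <;> omega
            _ = 2 * PySem.Int.band q3 M + b2 * 0 := pvBandB2 _ _ _ _ hb2' (Or.inl rfl)
            _ = 2*C := by rw [hC]; ring
        calc PySem.Int.band (f >>> (1:Nat)) (pvMu (K+1))
            = PySem.Int.band (2*q2 + b1) (2*(2*M) + 1) := by rw [hMu, hshr]; congr 1; omega
          _ = 2 * PySem.Int.band q2 (2*M) + b1 * 1 := pvBandB2 _ _ _ _ hb1' (Or.inr rfl)
          _ = 4*C + b1 := by rw [e1]; ring
      set Y : Int := PySem.Int.band C (Int.not G) with hY
      have hX : PySem.Int.band (PySem.Int.band (f >>> (1:Nat)) (pvMu (K+1)))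
          (Int.not (PySem.Int.band f (pvMu (K+1)))) = 4*Y + b1*(1-b0) := by
        rw [hchips, hgens, pvNotI]
        have e2 : PySem.Int.band (2*C) (-2*G-1) = 2*Y := by
          calc PySem.Int.band (2*C) (-2*G-1)
              = PySem.Int.band (2*C + 0) (2*(-G-1) + 1) := by congr 1 <;> ring
            _ = 2 * PySem.Int.band C (-G-1) + 0 * 1 := pvBandB2 _ _ _ _ (Or.inl rfl) (Or.inr rfl)
            _ = 2*Y := by rw [hY, pvNotI]; ring
        calc PySem.Int.band (4*C + b1) (-(4*G + b0) - 1)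
            = PySem.Int.band (2*(2*C) + b1) (2*(-2*G-1) + (1-b0)) := by congr 1 <;> ring
          _ = 2 * PySem.Int.band (2*C) (-2*G-1) + b1*(1-b0) := pvBandB2 _ _ _ _ hb1' (by omega)
          _ = 4*Y + b1*(1-b0) := by rw [e2]; ring
      have hY0 : 0 ≤ Y := PySem.Int.band_nonneg_of_nonneg_left _ (pvBandNonneg q3 M hM0)
      have hihq : check4ChipKillsLoop (List.replicate K (0:Int)) q2 = decide (Y = 0) := by
        rw [ih q2, hshrq, ← hG, ← hC, ← hY]
      have hprod : (2*b1 + b0 = 2 ∧ b1*(1-b0) = 1) ∨ (2*b1 + b0 ≠ 2 ∧ b1*(1-b0) = 0) := by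
        rcases hb0' with h|h <;> rcases hb1' with h'|h' <;> rw [h, h'] <;> norm_num
      simp only [List.replicate_succ, check4ChipKillsLoop]
      rw [show PySem.Int.mod f 4 = 2*b1 + b0 by
            simp only [PySem.Int.mod, Int.fmod_eq_emod]; omega,
          show PySem.Int.floordiv f 4 = q2 by
            simp only [PySem.Int.floordiv, Int.fdiv_eq_ediv]; omega,
          hX, hihq]
      by_cases h2 : 2*b1 + b0 = 2
      · rw [if_pos h2]
        have e : b1*(1-b0) = 1 := by rcases hprod with ⟨_, e⟩ | ⟨hne, _⟩; exact e; exact absurd h2 hne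
        rw [e]
        have hne0 : ¬ (4*Y + 1 = 0) := by omega
        simp [hne0]
      · rw [if_neg h2]
        have e : b1*(1-b0) = 0 := by rcases hprod with ⟨he, _⟩ | ⟨_, e⟩; exact absurd he h2; exact e
        rw [e, add_zero]
        simp only [decide_eq_decide]
        omega

theorem pvFloordiv2 (a : Int) : PySem.Int.floordiv a 2 = a / 2 := by
  simp [PySem.Int.floordiv, Int.fdiv_eq_ediv]

theorem pvFloordiv3 (a : Int) : PySem.Int.floordiv a 3 = a / 3 := by
  simp [PySem.Int.floordiv, Int.fdiv_eq_ediv]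

theorem pvLoopLen (xs : List Int) (f : Int) :
    check4ChipKillsLoop xs f = check4ChipKillsLoop (List.replicate xs.length (0:Int)) f := by
  induction xs generalizing f with
  | nil => rfl
  | cons x xs ih =>
      simp only [check4ChipKillsLoop, List.length_cons, List.replicate_succ]
      split <;> simp [ih]

theorem pvNumEq (K : Nat) :
    ((List.range K).map (fun k : Nat => (0:Int) + 2 * (k:Int))).foldl (fun acc x => acc + 2 ^ x.toNat) 0 = pvMu K := by
  induction K with
  | zero => simp [pvMu]
  | succ K ih =>
      rw [List.range_succ, List.map_append, List.foldl_append, ih]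
      have h1 : ((0:Int) + 2 * (K:Int)).toNat = 2*K := by omega
      have h2 : (2:Int) ^ (2*K) = 4 ^ K := by rw [pow_mul]; norm_num
      have h3 := pvMu_three_mul K
      have h4 := pvMu_three_mul (K+1)
      have h5 : (4:Int) ^ (K+1) = 4 * 4 ^ K := by rw [pow_succ]; ring
      simp only [List.map_cons, List.map_nil, List.foldl_cons, List.foldl_nil, h1, h2]
      omega

theorem pvMaskEq (K : Nat) : PySem.Int.floordiv (4 ^ K - 1) 3 = pvMu K := by
  rw [pvFloordiv3]
  have h := pvMu_three_mul K
  have : (4:Int) ^ K - 1 = 3 * pvMu K := by omega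
  rw [this, Int.mul_ediv_cancel_left _ (by norm_num)]

theorem check4ChipKills_spec : Claim_equal_check4ChipKills := by
  intro floor _
  unfold Spec_check4ChipKills
  simp only [check4ChipKills, check4ChipKills_alt]
  set L : Int := (PySem.Int.bitLength floor : Int) with hL
  have hL0 : 0 ≤ L := by positivity
  set Kn : Nat := ((L+1)/2).toNat with hKn
  have hcount : (if (0:Int) < L then ((L - 0 + 2 - 1)/2).toNat else 0) = Kn := by
    split <;> omega
  have hRange : PySem.List.pyRange 0 L 2 = (List.range Kn).map (fun k : Nat => (0:Int) + 2 * (k:Int)) := by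
    rw [PySem.List.pyRange_of_pos 0 L (by norm_num), hcount]
  have hk : (PySem.Int.floordiv (L+1) 2).toNat = Kn := by rw [pvFloordiv2]
  rw [hRange, pvNumEq, hk, pvMaskEq]
  by_cases h0 : PySem.Int.band floor (pvMu Kn) = 0
  · simp [h0]
  · simp only [if_neg h0]
    rw [pvLoopLen, List.length_map, List.length_range, pvMain]
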